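-- pv_equiv track=rewrite | github.com/Chuntim0303/news-feed | import_tickers.py | _is_common_stock
-- ===== SOURCE A (Python) =====
-- def _is_common_stock(security_name: str, etf_flag: str) -> bool:
--     """
--     Check if a security is a common stock (not an ETF, warrant, trust, etc.).
--
--     Args:
--         security_name: Full security name from NASDAQ data
--         etf_flag: 'Y' if ETF, 'N' otherwise
--
--     Returns:
--         True if this looks like a regular company common stock
--     """
--     if etf_flag == 'Y':
--         return False
--
--     name_lower = security_name.lower()
--
--     # Exclude non-company security types
--     exclude_patterns = [
--         'warrant',
--         'warrants',
--         ' etf',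
--         ' etn',
--         ' fund',
--         ' trust',
--         ' notes ',
--         ' note ',
--         'preferred',
--         ' pfd',
--         ' right',
--         ' rights',
--         ' unit',
--         ' units',
--         'depositary receipt',
--         'acquisition corp',
--         'blank check',
--         ' lp',
--         ' l.p.',
--         'limited partnership',
--         'royalty trust',
--         'closed-end',
--         'closed end',
--         'municipal',
--         'bond',
--         'income fund',
--         'debt',
--         'debenture',
--         'convertible',
--         'fixed rate',
--         'floating rate',
--         'perpetual',
--         'senior notes',
--         'subordinated',
--     ]
--
--     for pattern in exclude_patterns:
--         if pattern in name_lower: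
--             return False
--
--     return True
-- ===== SOURCE B (Python) =====
-- _EXCLUDE_PATTERNS = [
--     'warrant',
--     'warrants',
--     ' etf',
--     ' etn',
--     ' fund',
--     ' trust',
--     ' notes ',
--     ' note ',
--     'preferred',
--     ' pfd',
--     ' right',
--     ' rights',
--     ' unit',
--     ' units',
--     'depositary receipt',
--     'acquisition corp',
--     'blank check',
--     ' lp',
--     ' l.p.',
--     'limited partnership',
--     'royalty trust',
--     'closed-end',
--     'closed end',
--     'municipal',
--     'bond',
--     'income fund',
--     'debt',
--     'debenture',
--     'convertible',
--     'fixed rate',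
--     'floating rate',
--     'perpetual',
--     'senior notes',
--     'subordinated',
-- ]
--
--
-- def _is_common_stock(security_name: str, etf_flag: str) -> bool:
--     # Single left-to-right scan over the name: at each position, test whether
--     # any exclusion pattern starts there (instead of one full substring search
--     # per pattern).
--     if etf_flag == 'Y':
--         return False
--     name_lower = security_name.lower()
--     for i in range(len(name_lower) + 1):
--         if any(name_lower.startswith(p, i) for p in _EXCLUDE_PATTERNS):
--             return False
--     return True
-- ===== Notes on version B (the rewrite author's own statement) =====
-- stated objective: alternative
-- what changed: Replaces A's pattern-outer loop (one full substring search of the name per pattern, with early return) by a position-outer scan: one pass over the name that at each position tests whether any exclusion pattern starts there.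
import Mathlib
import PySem

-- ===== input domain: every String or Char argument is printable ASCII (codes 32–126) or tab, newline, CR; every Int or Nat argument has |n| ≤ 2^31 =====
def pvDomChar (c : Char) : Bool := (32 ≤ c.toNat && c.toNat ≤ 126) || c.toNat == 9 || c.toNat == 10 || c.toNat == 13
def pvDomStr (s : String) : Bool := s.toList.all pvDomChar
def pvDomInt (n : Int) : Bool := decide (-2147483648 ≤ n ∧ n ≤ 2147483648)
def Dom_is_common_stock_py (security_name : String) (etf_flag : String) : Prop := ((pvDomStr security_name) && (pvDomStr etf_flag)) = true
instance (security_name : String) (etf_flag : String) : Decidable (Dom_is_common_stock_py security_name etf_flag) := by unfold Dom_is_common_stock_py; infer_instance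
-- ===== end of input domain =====

-- B replaces A's per-pattern substring searches by a single left-to-right scan of the
-- name that tests at each position whether any exclusion pattern starts there (alternative
-- decomposition, similar cost); proved to return the same Bool on all inputs.


-- the exclusion-pattern list both Pythons carry verbatim
def excludePatterns : List String :=
  ["warrant", "warrants", " etf", " etn", " fund", " trust", " notes ", " note ",
   "preferred", " pfd", " right", " rights", " unit", " units", "depositary receipt",
   "acquisition corp", "blank check", " lp", " l.p.", "limited partnership",
   "royalty trust", "closed-end", "closed end", "municipal", "bond", "income fund",
   "debt", "debenture", "convertible", "fixed rate", "floating rate", "perpetual",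
   "senior notes", "subordinated"]

-- ===== PORT A =====
-- A's loop: for pattern in exclude_patterns: if pattern in name_lower: return False
def aLoop (nl : String) : List String → Bool
  | [] => true
  | p :: ps => if PySem.Str.isIn p nl then false else aLoop nl ps

def is_common_stock_py (security_name : String) (etf_flag : String) : Bool :=
  if etf_flag == "Y" then false
  else aLoop (PySem.Str.lower security_name) excludePatterns

-- ===== PORT B =====
-- any(name_lower.startswith(p, i) for p in _EXCLUDE_PATTERNS), at the suffix starting at i
def bHit (cs : List Char) : Bool :=
  excludePatterns.any (fun p => PySem.Chars.startswith cs p.toList)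

-- B's loop: for i in range(len(name_lower) + 1): if <hit at i>: return False; result negated
def bScan : List Char → Bool
  | [] => bHit []
  | c :: t => if bHit (c :: t) then true else bScan t

def is_common_stock_py_alt (security_name : String) (etf_flag : String) : Bool :=
  if etf_flag == "Y" then false
  else !(bScan (PySem.Str.lower security_name).toList)

-- ===== PRECONDITION & SPEC =====
def Spec_is_common_stock_py (security_name : String) (etf_flag : String) (out : Bool) : Prop := out = is_common_stock_py_alt security_name etf_flag
instance (security_name : String) (etf_flag : String) (out : Bool) : Decidable (Spec_is_common_stock_py security_name etf_flag out) := by unfold Spec_is_common_stock_py; infer_instance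

-- ===== CLAIM (what is proved, stated in full; the proofs are below) =====
def Claim_equal_is_common_stock_py : Prop := ∀ (security_name : String) (etf_flag : String), Dom_is_common_stock_py security_name etf_flag → Spec_is_common_stock_py security_name etf_flag (is_common_stock_py security_name etf_flag)

-- ===== LEMMAS AND PROOFS =====
theorem aLoop_eq_not_any (nl : String) (ps : List String) :
    aLoop nl ps = !(ps.any (fun p => PySem.Str.isIn p nl)) := by
  induction ps with
  | nil => rfl
  | cons p ps ih =>
    by_cases h : PySem.Str.isIn p nl = true <;> simp [aLoop, ih]

theorem bHit_iff (cs : List Char) :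
    bHit cs = true ↔ ∃ p ∈ excludePatterns, p.toList <+: cs := by
  simp [bHit, List.any_eq_true, PySem.Chars.startswith]

theorem bScan_iff (cs : List Char) :
    bScan cs = true ↔ ∃ p ∈ excludePatterns, p.toList <:+: cs := by
  induction cs with
  | nil =>
    rw [show bScan [] = bHit [] from rfl, bHit_iff]
    simp
  | cons c t ih =>
    rw [show bScan (c :: t) = (if bHit (c :: t) then true else bScan t) from rfl]
    by_cases h : bHit (c :: t) = true
    · rcases (bHit_iff _).mp h with ⟨p, hp, hpre⟩
      rw [h, if_pos rfl]
      exact ⟨fun _ => ⟨p, hp, hpre.isInfix⟩, fun _ => rfl⟩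
    · rw [if_neg h, ih]
      constructor
      · rintro ⟨p, hp, hi⟩; exact ⟨p, hp, hi.trans (List.suffix_cons c t).isInfix⟩
      · rintro ⟨p, hp, hi⟩
        rcases List.infix_cons_iff.mp hi with hpre | hi'
        · exact absurd ((bHit_iff _).mpr ⟨p, hp, hpre⟩) h
        · exact ⟨p, hp, hi'⟩

theorem any_isIn_eq_bScan (nl : String) :
    (excludePatterns.any fun p => PySem.Str.isIn p nl) = bScan nl.toList := by
  rw [Bool.eq_iff_iff, bScan_iff]
  simp only [List.any_eq_true, PySem.Str.isIn_iff_infix]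

-- ===== VERDICT (by name: the statement is the Claim_ definition above) =====
theorem is_common_stock_py_spec : Claim_equal_is_common_stock_py := by
  intro security_name etf_flag _
  unfold Spec_is_common_stock_py is_common_stock_py is_common_stock_py_alt
  by_cases he : etf_flag == "Y"
  · simp [he]
  · simp only [he, Bool.false_eq_true, if_false]
    rw [aLoop_eq_not_any, any_isIn_eq_bScan]
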